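-- pv_equiv track=rewrite | github.com/dturanski/scdf_at | src/python/cloudfoundry/manifest.py | format_env
-- ===== SOURCE A (Python) =====
-- def format_env(env, delim=': '):
--     s = ""
--     i = 0
--     for k, v in env.items():
--         spaces_not_tabs = ' ' * 4 if i > 0 else ''
--         format_str = "%s%s%s%s" if i == len(env) - 1 else "%s%s%s%s\n"
--         s = s + format_str % (spaces_not_tabs, k, delim, v)
--         i = i + 1
--     return s
-- ===== SOURCE B (Python) =====
-- def format_env(env, delim=': '):
--     return '\n    '.join("%s%s%s" % (k, delim, v) for k, v in env.items())
-- ===== Notes on version B (the rewrite author's own statement) =====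
-- stated objective: simpler
-- what changed: Replaces the index-tracking accumulation loop (counter i, indent-vs-empty and trailing-newline conditionals) with a single join over the rendered items, pushing all positional logic into the separator '\n' + four spaces.
import Mathlib
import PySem

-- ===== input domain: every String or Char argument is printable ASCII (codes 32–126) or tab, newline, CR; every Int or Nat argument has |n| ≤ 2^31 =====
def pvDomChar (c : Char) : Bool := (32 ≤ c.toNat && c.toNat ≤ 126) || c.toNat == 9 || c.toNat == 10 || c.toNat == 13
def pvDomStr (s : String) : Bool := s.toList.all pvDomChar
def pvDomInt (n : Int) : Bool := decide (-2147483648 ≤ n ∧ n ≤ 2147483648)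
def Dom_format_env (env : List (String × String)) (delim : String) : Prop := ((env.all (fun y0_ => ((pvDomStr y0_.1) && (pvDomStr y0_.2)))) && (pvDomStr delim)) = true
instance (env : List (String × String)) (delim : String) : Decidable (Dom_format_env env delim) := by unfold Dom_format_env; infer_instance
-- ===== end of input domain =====

-- B replaces A's counter-and-conditionals concatenation loop by one join whose separator carries
-- the between-items "newline + 4 spaces"; objective: simpler.

-- ===== PORT A =====
-- one loop iteration of A: state (s, i), n = len(env)
def faStep (n : Nat) (delim : String) (si : String × Nat) (kv : String × String) : String × Nat :=
  let spaces_not_tabs : String := if si.2 > 0 then "    " else ""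
  let format_tail : String := if si.2 = n - 1 then "" else "\n"
  (si.1 ++ (spaces_not_tabs ++ kv.1 ++ delim ++ kv.2 ++ format_tail), si.2 + 1)

def format_env (env : List (String × String)) (delim : String) : String :=
  (env.foldl (faStep env.length delim) ("", 0)).1

-- ===== PORT B =====
def format_env_alt (env : List (String × String)) (delim : String) : String :=
  PySem.Str.join "\n    " (env.map (fun kv => kv.1 ++ delim ++ kv.2))

-- ===== PRECONDITION & SPEC =====
def Spec_format_env (env : List (String × String)) (delim : String) (out : String) : Prop := out = format_env_alt env delim
instance (env : List (String × String)) (delim : String) (out : String) : Decidable (Spec_format_env env delim out) := by unfold Spec_format_env; infer_instance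

-- ===== CLAIM (what is proved, stated in full; the proofs are below) =====
def Claim_equal_format_env : Prop := ∀ (env : List (String × String)) (delim : String), Dom_format_env env delim → Spec_format_env env delim (format_env env delim)

-- ===== LEMMAS AND PROOFS =====

-- A's loop after the first item: counter positive, every item indented, newline except on the last
theorem faLoop_pos (delim : String) :
    ∀ (l : List (String × String)) (n i : Nat) (s : String),
      i + l.length = n → 0 < i → l ≠ [] →
      (l.foldl (faStep n delim) (s, i)).1 =
        s ++ "    " ++ PySem.Str.join "\n    " (l.map (fun kv => kv.1 ++ delim ++ kv.2)) := by
  intro l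
  induction l with
  | nil => intro n i s _ _ h; exact absurd rfl h
  | cons a rest ih =>
    intro n i s hn hi _
    cases rest with
    | nil =>
      have hlast : i = n - 1 := by simp at hn; omega
      apply String.toList_inj.mp
      simp [List.foldl, faStep, if_pos hi, if_pos hlast, PySem.Str.toList_join,
        PySem.Chars.join_singleton]
    | cons b rest' =>
      have hne : i ≠ n - 1 := by simp at hn; omega
      have step : (faStep n delim (s, i) a) =
          (s ++ ("    " ++ a.1 ++ delim ++ a.2 ++ "\n"), i + 1) := by
        simp [faStep, if_pos hi, if_neg hne]
      rw [List.foldl_cons, step,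
        ih n (i + 1) _ (by simp at hn ⊢; omega) (Nat.succ_pos i) (by simp)]
      apply String.toList_inj.mp
      simp [PySem.Str.toList_join, PySem.Chars.join_cons_cons]

-- ===== VERDICT (by name: the statement is the Claim_ definition above) =====
theorem format_env_spec : Claim_equal_format_env := by
  intro env delim _
  show format_env env delim = format_env_alt env delim
  cases env with
  | nil => rfl
  | cons a rest =>
    unfold format_env format_env_alt
    cases rest with
    | nil =>
      apply String.toList_inj.mp
      simp [List.foldl, faStep, PySem.Str.toList_join, PySem.Chars.join_singleton]
    | cons b rest' =>
      have step : faStep ((a :: b :: rest').length) delim ("", 0) a =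
          ("" ++ ("" ++ a.1 ++ delim ++ a.2 ++ "\n"), 1) := by
        simp [faStep]
      rw [List.foldl_cons, step,
        faLoop_pos delim (b :: rest') ((a :: b :: rest').length) 1 _ (by simp; omega) Nat.one_pos (by simp)]
      apply String.toList_inj.mp
      simp [PySem.Str.toList_join, PySem.Chars.join_cons_cons]
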